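-- pv_equiv track=rewrite | github.com/React95/R95-fonts | scripts/fnt2ttf.py | make_tofu_matrix
-- ===== SOURCE A (Python) =====
-- def make_tofu_matrix(height: int, width: int) -> list[list[int]]:
--     """Filled-rectangle placeholder for glyphs with no known ASCII stand-in."""
--     margin_v = max(1, height // 5)
--     margin_h = max(1, width // 5)
--     return [
--         [1 if (margin_v <= r < height - margin_v and margin_h <= c < width - margin_h) else 0
--          for c in range(width)]
--         for r in range(height)
--     ]
-- ===== SOURCE B (Python) =====
-- def make_tofu_matrix(height: int, width: int) -> list[list[int]]:
--     """Filled-rectangle placeholder for glyphs with no known ASCII stand-in."""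
--     margin_v = max(1, height // 5)
--     margin_h = max(1, width // 5)
--     rows = max(height, 0)
--     cols = max(width, 0)
--     flat = [0] * (rows * cols)
--     for r in range(margin_v, height - margin_v):
--         base = r * cols
--         flat[base + margin_h: base + width - margin_h] = [1] * (width - 2 * margin_h)
--     return [flat[i * cols: (i + 1) * cols] for i in range(height)]
-- ===== Notes on version B (the rewrite author's own statement) =====
-- stated objective: faster
-- what changed: B abandons the per-cell nested comprehension: it allocates one flat 1-D buffer of rows*cols zeros, fills the interior block with one bulk slice assignment per interior row, and then reshapes the buffer into rows by slicing, so no cell is ever tested against the margin condition.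
import Mathlib
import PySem

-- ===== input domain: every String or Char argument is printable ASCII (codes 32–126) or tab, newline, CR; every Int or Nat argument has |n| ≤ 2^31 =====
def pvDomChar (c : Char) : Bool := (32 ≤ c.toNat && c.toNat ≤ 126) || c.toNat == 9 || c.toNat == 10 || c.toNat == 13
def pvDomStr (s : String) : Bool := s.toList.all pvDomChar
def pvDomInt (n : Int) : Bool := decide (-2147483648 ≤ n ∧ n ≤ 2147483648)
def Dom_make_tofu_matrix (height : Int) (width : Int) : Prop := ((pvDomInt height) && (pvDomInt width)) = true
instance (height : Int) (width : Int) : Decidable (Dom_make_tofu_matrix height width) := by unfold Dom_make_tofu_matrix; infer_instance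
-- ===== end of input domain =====

-- B replaces A's per-cell nested comprehension by a flat 1-D zero buffer filled with one
-- slice assignment per interior row and then reshaped into rows by slicing (alternative decomposition).


-- ===== PORT A =====
def make_tofu_matrix (height : Int) (width : Int) : List (List Int) :=
  let margin_v := max 1 (PySem.Int.floordiv height 5)
  let margin_h := max 1 (PySem.Int.floordiv width 5)
  (PySem.List.pyRange 0 height 1).map (fun r =>
    (PySem.List.pyRange 0 width 1).map (fun c =>
      if (margin_v ≤ r ∧ r < height - margin_v) ∧ (margin_h ≤ c ∧ c < width - margin_h)
      then (1 : Int) else 0))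

-- ===== PORT B =====
-- exact port of Python slice assignment `l[a:b] = xs` (resulting value), exact for the bounds
-- B reaches (whenever l is nonempty both a and b are nonnegative here; on an empty l every
-- slice is []): result is l[:a] ++ xs ++ l[max(a,b):]
def pySliceAssign (l : List Int) (a b : Int) (xs : List Int) : List Int :=
  PySem.List.slice l none (some a) ++ xs ++ PySem.List.slice l (some (max a b)) none

def make_tofu_matrix_alt (height : Int) (width : Int) : List (List Int) :=
  let margin_v := max 1 (PySem.Int.floordiv height 5)
  let margin_h := max 1 (PySem.Int.floordiv width 5)
  let rows := max height 0
  let cols := max width 0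
  let flat := (PySem.List.pyRange margin_v (height - margin_v) 1).foldl
      (fun f r => pySliceAssign f (r * cols + margin_h) (r * cols + width - margin_h)
        (List.replicate (width - 2 * margin_h).toNat (1 : Int)))      -- [1] * (width - 2*margin_h)
      (List.replicate (rows * cols).toNat (0 : Int))                  -- [0] * (rows*cols)
  (PySem.List.pyRange 0 height 1).map (fun i =>
      PySem.List.slice flat (some (i * cols)) (some ((i + 1) * cols)))

-- ===== PRECONDITION & SPEC =====
def Spec_make_tofu_matrix (height : Int) (width : Int) (out : List (List Int)) : Prop := out = make_tofu_matrix_alt height width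
instance (height : Int) (width : Int) (out : List (List Int)) : Decidable (Spec_make_tofu_matrix height width out) := by unfold Spec_make_tofu_matrix; infer_instance

-- ===== CLAIM (what is proved, stated in full; the proofs are below) =====
def Claim_equal_make_tofu_matrix : Prop := ∀ (height : Int) (width : Int), Dom_make_tofu_matrix height width → Spec_make_tofu_matrix height width (make_tofu_matrix height width)

-- ===== LEMMAS AND PROOFS =====

-- the interior row, written as the three blocks B's slice assignment produces
def irow (w mh : Int) : List Int :=
  List.replicate mh.toNat (0:Int) ++ List.replicate (w - 2*mh).toNat 1 ++ List.replicate mh.toNat 0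

theorem irow_length (w mh : Int) (h1 : 1 ≤ mh) (h2 : 2*mh ≤ w) : (irow w mh).length = w.toNat := by
  simp [irow]; omega

theorem map_range_const (n : Nat) (f : Nat → Int) (v : Int) (h : ∀ k, k < n → f k = v) :
    (List.range n).map f = List.replicate n v := by
  rw [List.eq_replicate_iff]
  refine ⟨by simp, ?_⟩
  intro x hx
  simp only [List.mem_map, List.mem_range] at hx
  obtain ⟨k, hk, rfl⟩ := hx
  exact h k hk

-- a row of A on which the condition never holds is an all-zero row
theorem row_const_zero (w : Int) (p : Int → Prop) [DecidablePred p] (h : ∀ c, ¬ p c) :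
    (PySem.List.pyRange 0 w 1).map (fun c => if p c then (1 : Int) else 0)
      = List.replicate w.toNat (0 : Int) := by
  rw [PySem.List.pyRange_one]
  simp only [List.map_map, Int.sub_zero]
  simp [h, Function.comp_def]

-- an interior row of A equals the three-block row
theorem row_inner (w mh : Int) (h1 : 1 ≤ mh) (h2 : 2*mh ≤ w) :
    (PySem.List.pyRange 0 w 1).map (fun c => if mh ≤ c ∧ c < w - mh then (1:Int) else 0)
      = irow w mh := by
  rw [PySem.List.pyRange_one]
  have hw0 : (w - 0).toNat = mh.toNat + ((w - 2*mh).toNat + mh.toNat) := by omega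
  rw [hw0]
  simp only [List.range_add, List.map_append, List.map_map, Function.comp_def]
  unfold irow
  rw [List.append_assoc]
  congr 1
  · refine map_range_const _ _ _ ?_
    intro k hk
    dsimp only
    rw [if_neg]; omega
  congr 1
  · refine map_range_const _ _ _ ?_
    intro k hk
    dsimp only
    rw [if_pos]
    constructor <;> omega
  · refine map_range_const _ _ _ ?_
    intro k hk
    dsimp only
    rw [if_neg]; omega

theorem foldl_fixed {α β : Type} (f : α → β → α) (x : α) (l : List β)
    (h : ∀ r ∈ l, f x r = x) : l.foldl f x = x := by
  induction l with
  | nil => rfl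
  | cons r l ih =>
    rw [List.foldl_cons, h r (by simp)]
    exact ih (fun s hs => h s (by simp [hs]))

theorem slice_nil (a? b? : Option Int) : PySem.List.slice ([] : List Int) a? b? = [] := by
  cases a? <;> cases b? <;> simp [PySem.List.slice]

-- one interior-row slice assignment writes the next three-block row into the zero suffix
theorem fold_inv (w mh hi : Int) (hmh : 1 ≤ mh) (hw : 2*mh ≤ w) :
    ∀ (n : Nat) (lo : Int) (P : List Int) (T : Nat), 1 ≤ lo → lo + n = hi →
    P.length = (lo*w).toNat →
    (PySem.List.pyRange lo hi 1).foldl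
        (fun f r => pySliceAssign f (r*w + mh) (r*w + w - mh) (List.replicate (w - 2*mh).toNat 1))
        (P ++ List.replicate (n * w.toNat + T) (0:Int))
      = P ++ (List.replicate n (irow w mh)).flatten ++ List.replicate T (0:Int) := by
  intro n
  induction n with
  | zero =>
    intro lo P T hlo hhi hP
    have : hi = lo := by omega
    subst this
    rw [PySem.List.pyRange_one]
    simp
  | succ n ih =>
    intro lo P T hlo hhi hP
    have hlt : lo < hi := by omega
    have hlow : 0 ≤ lo * w := mul_nonneg (by omega) (by omega)
    rw [PySem.List.pyRange_one_cons hlt, List.foldl_cons]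
    have step : pySliceAssign (P ++ List.replicate ((n+1) * w.toNat + T) (0:Int))
        (lo*w + mh) (lo*w + w - mh) (List.replicate (w - 2*mh).toNat 1)
        = (P ++ irow w mh) ++ List.replicate (n * w.toNat + T) (0:Int) := by
      unfold pySliceAssign
      have hmax : max (lo*w + mh) (lo*w + w - mh) = lo*w + w - mh := by omega
      rw [hmax, PySem.List.slice_to _ (by omega : (0:Int) ≤ lo*w + mh),
          PySem.List.slice_from _ (by omega : (0:Int) ≤ lo*w + w - mh)]
      have ha : (lo*w + mh).toNat = P.length + mh.toNat := by omega
      have hb : (lo*w + w - mh).toNat = P.length + (w.toNat - mh.toNat) := by omega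
      rw [ha, hb, List.take_append, List.drop_append,
          List.take_of_length_le (by omega : P.length ≤ P.length + mh.toNat),
          List.drop_of_length_le (by omega : P.length ≤ P.length + (w.toNat - mh.toNat))]
      have e1 : P.length + mh.toNat - P.length = mh.toNat := by omega
      have e2 : P.length + (w.toNat - mh.toNat) - P.length = w.toNat - mh.toNat := by omega
      rw [e1, e2, List.take_replicate, List.drop_replicate]
      have e3 : min mh.toNat ((n+1) * w.toNat + T) = mh.toNat := by
        have : w.toNat ≤ (n+1) * w.toNat := Nat.le_mul_of_pos_left _ (Nat.succ_pos n)
        omega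
      have e4 : (n+1) * w.toNat + T - (w.toNat - mh.toNat) = mh.toNat + (n * w.toNat + T) := by
        have : (n+1) * w.toNat = w.toNat + n * w.toNat := by ring
        omega
      rw [e3, e4, List.replicate_add]
      simp [irow, List.append_assoc]
    rw [step]
    have hlen : (P ++ irow w mh).length = ((lo+1)*w).toNat := by
      rw [List.length_append, irow_length w mh hmh hw, hP]
      have h5 : (lo+1)*w = lo*w + w := by ring
      omega
    rw [ih (lo+1) (P ++ irow w mh) T (by omega) (by omega) hlen]
    simp [List.replicate_succ, List.append_assoc]

-- extracting row k of a flatten of uniform-width rows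
theorem slice_flatten_row (W : Nat) : ∀ (R : List (List Int)) (k : Nat),
    (∀ row ∈ R, row.length = W) → ∀ (hk : k < R.length),
    (R.flatten.drop (k*W)).take W = R[k] := by
  intro R
  induction R with
  | nil => intro k _ hk; simp at hk
  | cons r R ih =>
    intro k hW hk
    have hr : r.length = W := hW r (by simp)
    cases k with
    | zero =>
      simp only [Nat.zero_mul, List.drop_zero, List.flatten_cons, List.take_append]
      rw [List.take_of_length_le (by omega), hr]
      simp
    | succ k =>
      have h1 : (k+1)*W = r.length + k*W := by rw [hr]; ring
      rw [List.flatten_cons, h1, List.drop_append,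
          List.drop_of_length_le (by omega : r.length ≤ r.length + k*W)]
      have h2 : r.length + k*W - r.length = k*W := by omega
      rw [h2, List.nil_append]
      rw [ih k (fun row hrow => hW row (by simp [hrow])) (by simpa using hk)]
      simp

-- indexing the three-band row list
theorem getR (M K : Nat) (zr ir : List Int) (k : Nat)
    (hk : k < (List.replicate M zr ++ List.replicate K ir ++ List.replicate M zr).length) :
    (List.replicate M zr ++ List.replicate K ir ++ List.replicate M zr)[k]
      = if M ≤ k ∧ k < M + K then ir else zr := by
  simp only [List.length_append, List.length_replicate] at hk
  by_cases h1 : k < M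
  · rw [List.getElem_append_left (by simp; omega)]
    rw [List.getElem_append_left (by simpa using h1), List.getElem_replicate, if_neg (by omega)]
  · by_cases h2 : k < M + K
    · rw [List.getElem_append_left (by simp; omega)]
      rw [List.getElem_append_right (by simpa using h1), List.getElem_replicate, if_pos (by omega)]
    · rw [List.getElem_append_right (by simp; omega), List.getElem_replicate, if_neg (by omega)]

-- a margin of max(1, x // 5) never exceeds half of x once x ≥ 2
theorem margin_le (x : Int) (hx : 2 ≤ x) : 2 * max 1 (PySem.Int.floordiv x 5) ≤ x := by
  rw [PySem.Int.floordiv_eq_ediv_of_pos (by norm_num)]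
  rcases max_cases 1 (x / 5) with ⟨he, _⟩ | ⟨he, _⟩ <;> omega

-- the zero buffer is a flatten of zero rows
theorem flatten_replicate_zero (n W : Nat) :
    (List.replicate n (List.replicate W (0:Int))).flatten = List.replicate (n*W) (0:Int) := by
  induction n with
  | zero => simp
  | succ k ih =>
    rw [List.replicate_succ, List.flatten_cons, ih]
    rw [show (k+1)*W = W + k*W by ring, List.replicate_add]

-- ===== VERDICT (by name: the statement is the Claim_ definition above) =====

theorem make_tofu_matrix_spec : Claim_equal_make_tofu_matrix := by
  intro h w _
  unfold Spec_make_tofu_matrix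
  simp only [make_tofu_matrix, make_tofu_matrix_alt]
  by_cases hh : h ≤ 0
  · -- no rows at all
    have h0 : PySem.List.pyRange 0 h 1 = [] := by
      rw [PySem.List.pyRange_one]
      have : (h - 0).toNat = 0 := by omega
      rw [this]; rfl
    rw [h0]; rfl
  rw [not_le] at hh
  have hmh1 : (1:Int) ≤ max 1 (PySem.Int.floordiv w 5) := le_max_left _ _
  have hmv1 : (1:Int) ≤ max 1 (PySem.Int.floordiv h 5) := le_max_left _ _
  by_cases hw0 : w ≤ 0
  · -- every row is empty: the flat buffer is empty and stays empty
    have hflat0 : (max h 0 * max w 0).toNat = 0 := by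
      have h1 : max w 0 = 0 := by omega
      rw [h1, mul_zero]; rfl
    have hones : (w - 2 * max 1 (PySem.Int.floordiv w 5)).toNat = 0 := by omega
    rw [hflat0, hones]
    rw [foldl_fixed _ _ _ (fun r _ => by
      simp only [List.replicate_zero]
      rw [show pySliceAssign [] (r * max w 0 + max 1 (PySem.Int.floordiv w 5))
            (r * max w 0 + w - max 1 (PySem.Int.floordiv w 5)) [] =
          PySem.List.slice [] none _ ++ [] ++ PySem.List.slice [] (some _) none from rfl]
      rw [slice_nil, slice_nil]; rfl)]
    apply List.map_congr_left
    intro i _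
    have hwr : PySem.List.pyRange 0 w 1 = [] := by
      rw [PySem.List.pyRange_one]
      have : (w - 0).toNat = 0 := by omega
      rw [this]; rfl
    rw [hwr, List.replicate_zero, slice_nil]; rfl
  rw [not_le] at hw0
  rw [show max h 0 = h from by omega, show max w 0 = w from by omega]
  by_cases hw1 : w = 1
  · -- width 1: the interior is empty, every slice assignment is the identity
    subst hw1
    have hm : max 1 (PySem.Int.floordiv (1:Int) 5) = 1 := by decide
    rw [hm]
    have hones : ((1:Int) - 2 * 1).toNat = 0 := by decide
    rw [hones]
    rw [foldl_fixed _ _ _ (fun r hr => by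
      have hr1 : 1 ≤ r := by
        have := (PySem.List.mem_pyRange_one).1 hr
        omega
      simp only [List.replicate_zero]
      show PySem.List.slice _ none (some (r*1+1)) ++ [] ++
           PySem.List.slice _ (some (max (r*1+1) (r*1+1-1))) none = _
      have hmx : max (r*1+1) (r*1+1-1) = r*1+1 := by omega
      rw [hmx, PySem.List.slice_to _ (by omega), PySem.List.slice_from _ (by omega)]
      rw [List.append_nil, List.take_append_drop])]
    apply List.map_congr_left
    intro i hi
    have hi' := (PySem.List.mem_pyRange_one).1 hi
    have hr : PySem.List.pyRange 0 1 1 = [0] := by decide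
    rw [hr]
    rw [PySem.List.slice_toNat _ (by omega : (0:Int) ≤ i*1) (by omega : (0:Int) ≤ (i+1)*1)]
    have e1 : (i*1).toNat = i.toNat := by omega
    have e2 : ((i+1)*1).toNat = i.toNat + 1 := by omega
    rw [e1, e2, List.drop_replicate, List.take_replicate]
    have e3 : min (i.toNat + 1 - i.toNat) ((h*1).toNat - i.toNat) = 1 := by
      have : (h*1).toNat = h.toNat := by omega
      omega
    rw [e3]
    simp only [List.map_cons, List.map_nil]
    rw [if_neg (by omega)]
    rfl
  have hw2 : (2:Int) ≤ w := by omega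
  have hmh2 : 2 * max 1 (PySem.Int.floordiv w 5) ≤ w := margin_le w hw2
  set mv := max 1 (PySem.Int.floordiv h 5) with hmv
  set mh := max 1 (PySem.Int.floordiv w 5) with hmh
  by_cases hh1 : h = 1
  · -- a single row, which is entirely margin
    subst hh1
    have hm : mv = 1 := by rw [hmv]; decide
    have hrange : PySem.List.pyRange mv (1 - mv) 1 = [] := by
      rw [hm, PySem.List.pyRange_one]
      rfl
    rw [hrange, List.foldl_nil]
    apply List.map_congr_left
    intro i hi
    have hi' := (PySem.List.mem_pyRange_one).1 hi
    have hi0 : i = 0 := by omega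
    subst hi0
    rw [PySem.List.slice_toNat _ (by omega) (by omega : (0:Int) ≤ (0+1)*w)]
    have e1 : ((0:Int)*w).toNat = 0 := by omega
    have e2 : (((0:Int)+1)*w).toNat = w.toNat := by omega
    rw [e1, e2, List.drop_zero, List.take_replicate]
    have e3 : min (w.toNat - 0) ((1*w).toNat) = w.toNat := by omega
    rw [e3]
    refine row_const_zero w _ ?_
    rintro c ⟨⟨hA, hB⟩, -⟩
    rw [hm] at hA hB
    omega
  have hh2 : (2:Int) ≤ h := by omega
  have hmv2 : 2 * mv ≤ h := margin_le h hh2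
  -- the general case: characterize the flat buffer with the fold invariant
  have hKdef : mv + ((h - 2*mv).toNat : Int) = h - mv := by omega
  have hPlen : (List.replicate (mv.toNat * w.toNat) (0:Int)).length = (mv*w).toNat := by
    rw [List.length_replicate, Int.toNat_mul (by omega) (by omega)]
  have hinit : List.replicate (h*w).toNat (0:Int)
      = List.replicate (mv.toNat * w.toNat) 0
        ++ List.replicate ((h - 2*mv).toNat * w.toNat + mv.toNat * w.toNat) 0 := by
    rw [← List.replicate_add]
    congr 1
    rw [Int.toNat_mul (by omega : (0:Int) ≤ h) (by omega : (0:Int) ≤ w)]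
    have : h.toNat = mv.toNat + (h - 2*mv).toNat + mv.toNat := by omega
    rw [this]; ring
  rw [hinit,
      fold_inv w mh (h - mv) (by omega) hmh2 (h - 2*mv).toNat mv
        (List.replicate (mv.toNat * w.toNat) 0) (mv.toNat * w.toNat)
        (by omega) hKdef hPlen]
  -- the buffer is the flatten of the three row bands
  have hflatR :
      List.replicate (mv.toNat * w.toNat) (0:Int)
        ++ (List.replicate (h - 2*mv).toNat (irow w mh)).flatten
        ++ List.replicate (mv.toNat * w.toNat) 0
      = (List.replicate mv.toNat (List.replicate w.toNat (0:Int))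
          ++ List.replicate (h - 2*mv).toNat (irow w mh)
          ++ List.replicate mv.toNat (List.replicate w.toNat (0:Int))).flatten := by
    simp only [List.flatten_append, flatten_replicate_zero]
  rw [hflatR]
  apply List.map_congr_left
  intro i hi
  have hi' := (PySem.List.mem_pyRange_one).1 hi
  have hiR : i.toNat < (List.replicate mv.toNat (List.replicate w.toNat (0:Int))
          ++ List.replicate (h - 2*mv).toNat (irow w mh)
          ++ List.replicate mv.toNat (List.replicate w.toNat (0:Int))).length := by
    simp only [List.length_append, List.length_replicate]
    omega
  have hWrows : ∀ row ∈ (List.replicate mv.toNat (List.replicate w.toNat (0:Int))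
          ++ List.replicate (h - 2*mv).toNat (irow w mh)
          ++ List.replicate mv.toNat (List.replicate w.toNat (0:Int))), row.length = w.toNat := by
    intro row hrow
    simp only [List.mem_append, List.mem_replicate] at hrow
    rcases hrow with (⟨-, rfl⟩ | ⟨-, rfl⟩) | ⟨-, rfl⟩
    · exact List.length_replicate
    · exact irow_length w mh (by omega) hmh2
    · exact List.length_replicate
  -- B's row i is row i of the band list
  rw [PySem.List.slice_toNat _ (mul_nonneg (by omega) (by omega))
        (mul_nonneg (by omega) (by omega))]
  have e1 : (i*w).toNat = i.toNat * w.toNat := Int.toNat_mul (by omega) (by omega)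
  have e2 : ((i+1)*w).toNat = (i.toNat + 1) * w.toNat := by
    rw [show (i+1)*w = ((i.toNat:Int)+1) * w by rw [Int.toNat_of_nonneg (by omega)]]
    rw [show ((i.toNat:Int)+1) = ((i.toNat+1 : Nat) : Int) by push_cast; ring]
    exact Int.toNat_mul (by positivity) (by omega)
  have e3 : ((i+1)*w).toNat - (i*w).toNat = w.toNat := by
    rw [e1, e2]; rw [Nat.succ_mul]; omega
  rw [e3, e1, slice_flatten_row w.toNat _ i.toNat hWrows hiR]
  rw [getR _ _ _ _ _ hiR]
  -- A's row i equals the same band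
  by_cases hcond : mv ≤ i ∧ i < h - mv
  · rw [if_pos (by omega)]
    rw [show (fun c => if (mv ≤ i ∧ i < h - mv) ∧ (mh ≤ c ∧ c < w - mh) then (1:Int) else 0)
          = (fun c => if mh ≤ c ∧ c < w - mh then (1:Int) else 0) from
        funext (fun c => if_congr (and_iff_right hcond) rfl rfl)]
    exact row_inner w mh (by omega) hmh2
  · rw [if_neg (by omega)]
    refine row_const_zero w _ ?_
    rintro c ⟨hc1, -⟩
    exact hcond hc1
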